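-- pv_equiv track=rewrite | github.com/naiyer-abbas/Digital-to-Digital-Line-Encoder | Line_Encoding.py | find_zero_sequence
-- ===== SOURCE A (Python) =====
-- def find_zero_sequence(l,x):
--     zero_count = 0
--     l2 = []
--     for i in range(len(l)):
--         if l[i] == 0:
--             zero_count = zero_count + 1
--         if l[i] == 1:
--             zero_count = 0
--         if zero_count == x:
--             l2.append(i - (x-1))
--             l2.append(i)
--     return l2
-- ===== SOURCE B (Python) =====
-- def find_zero_sequence(l, x):
--     out = []
--     for i in range(len(l)):
--         # scan backward to the most recent 1 at or before i
--         j = i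
--         while j >= 0 and l[j] != 1:
--             j -= 1
--         # count zeros strictly after that 1, up to and including i
--         zeros = sum(1 for k in range(j + 1, i + 1) if l[k] == 0)
--         if zeros == x:
--             out.append(i - (x - 1))
--             out.append(i)
--     return out
-- ===== Notes on version B (the rewrite author's own statement) =====
-- stated objective: alternative
-- what changed: B drops A's single-pass running counter entirely: for each index it scans backward to the most recent 1 and counts the zeros in that span, a per-index brute-force recomputation instead of carried loop state.
import Mathlib
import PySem

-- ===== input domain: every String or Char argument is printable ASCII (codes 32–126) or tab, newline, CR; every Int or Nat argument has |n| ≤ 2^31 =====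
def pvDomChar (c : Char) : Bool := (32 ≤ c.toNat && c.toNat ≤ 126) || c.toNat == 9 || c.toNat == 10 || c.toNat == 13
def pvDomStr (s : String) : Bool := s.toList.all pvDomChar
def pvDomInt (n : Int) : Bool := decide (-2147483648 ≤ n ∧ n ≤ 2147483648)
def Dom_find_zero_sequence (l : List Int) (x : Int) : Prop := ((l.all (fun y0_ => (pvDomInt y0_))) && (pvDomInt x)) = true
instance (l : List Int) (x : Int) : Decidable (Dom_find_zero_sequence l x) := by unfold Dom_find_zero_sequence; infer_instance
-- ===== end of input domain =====

-- B replaces A's running-counter single pass by a per-index brute force (scan back to the last 1, count zeros in that span); objective: alternative algorithm, same results at quadratic cost.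


-- ===== PORT A =====
-- literal port of A: one fold over the indexed list, carrying (zero_count, l2)
def find_zero_sequence (l : List Int) (x : Int) : List Int :=
  ((PySem.List.enumerate l 0).foldl (fun (st : Int × List Int) p =>
    let zc1 := if p.2 == 0 then st.1 + 1 else st.1
    let zc2 := if p.2 == 1 then 0 else zc1
    let l2 := if zc2 == x then st.2 ++ [p.1 - (x - 1), p.1] else st.2
    (zc2, l2)) ((0 : Int), ([] : List Int))).2

-- ===== PORT B =====
-- the backward while-loop of Source B: j starts at i and steps down while l[j] != 1
-- (indices passed are always < l.length, so the getD default is never consulted)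
def fzsLastOne (l : List Int) : Nat → Int
  | 0 => if l.getD 0 0 == 1 then 0 else -1
  | j+1 => if l.getD (j+1) 0 == 1 then ((j : Int) + 1) else fzsLastOne l j

-- zeros counted over range(j+1, i+1), as in Source B's sum(...)
def fzsZeros (l : List Int) (i : Nat) : Nat :=
  let j := fzsLastOne l i
  (List.range' (j + 1).toNat (i + 1 - (j + 1).toNat)).countP (fun k => l.getD k 0 == 0)

def find_zero_sequence_alt (l : List Int) (x : Int) : List Int :=
  (List.range l.length).flatMap (fun i =>
    if ((fzsZeros l i : Int) == x) then [(i : Int) - (x - 1), (i : Int)] else [])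

-- ===== PRECONDITION & SPEC =====
def Spec_find_zero_sequence (l : List Int) (x : Int) (out : List Int) : Prop := out = find_zero_sequence_alt l x
instance (l : List Int) (x : Int) (out : List Int) : Decidable (Spec_find_zero_sequence l x out) := by unfold Spec_find_zero_sequence; infer_instance

-- ===== CLAIM (what is proved, stated in full; the proofs are below) =====
def Claim_equal_find_zero_sequence : Prop := ∀ (l : List Int) (x : Int), Dom_find_zero_sequence l x → Spec_find_zero_sequence l x (find_zero_sequence l x)

-- ===== LEMMAS AND PROOFS =====

-- the running counter of A, as a reducer, used only by the proofs to bridge the two ports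
def fzsStep (acc v : Int) : Int := if v == 0 then acc + 1 else if v == 1 then 0 else acc

lemma scanl_getD_succ (f : Int → Int → Int) (b : Int) (l : List Int) (n : Nat) (d : Int) :
    (List.scanl f b l).getD (n + 1) d = (List.scanl f b l).tail.getD n d := by
  cases l <;> simp [List.scanl]

lemma fzs_tail_shift (cs : List Int) (x s : Int) (n : Nat) :
    (List.range n).flatMap (fun i =>
      if cs.getD (i + 1) 0 == x then [s + 1 + (i : Int) - (x - 1), s + 1 + (i : Int)] else [])
    = (List.range n).flatMap (fun i =>
      if cs.getD (i + 1) 0 == x then [s + ((i : Int) + 1) - (x - 1), s + ((i : Int) + 1)] else []) := by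
  congr 1
  funext i
  split
  · have h1 : s + 1 + (i : Int) - (x - 1) = s + ((i : Int) + 1) - (x - 1) := by ring
    have h2 : s + 1 + (i : Int) = s + ((i : Int) + 1) := by ring
    rw [h1, h2]
  · rfl

-- A's fold equals a flatMap over the scanl table of its counter
lemma fzs_key (l : List Int) : ∀ (x zc : Int) (s : Int) (acc : List Int),
    ((PySem.List.enumerate l s).foldl (fun (st : Int × List Int) p =>
      let zc1 := if p.2 == 0 then st.1 + 1 else st.1
      let zc2 := if p.2 == 1 then 0 else zc1
      let l2 := if zc2 == x then st.2 ++ [p.1 - (x - 1), p.1] else st.2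
      (zc2, l2)) (zc, acc)).2
    = acc ++ (List.range l.length).flatMap (fun i =>
        if (l.scanl fzsStep zc).tail.getD i 0 == x then [s + (i : Int) - (x - 1), s + (i : Int)] else []) := by
  induction l with
  | nil => intro x zc s acc; simp [PySem.List.enumerate]
  | cons v t ih =>
    intro x zc s acc
    rw [PySem.List.enumerate_cons, List.foldl_cons]
    have hinit : (let zc1 := if (s, v).2 == (0 : Int) then (zc, acc).1 + 1 else (zc, acc).1
        let zc2 := if (s, v).2 == (1 : Int) then (0 : Int) else zc1
        let l2 := if zc2 == x then (zc, acc).2 ++ [(s, v).1 - (x - 1), (s, v).1] else (zc, acc).2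
        ((zc2, l2) : Int × List Int))
        = (fzsStep zc v, if fzsStep zc v == x then acc ++ [s - (x - 1), s] else acc) := by
      simp only [fzsStep]
      by_cases h0 : v = 0
      · subst h0; norm_num
      · by_cases h1 : v = 1 <;> simp [h0, h1]
    rw [hinit, ih x (fzsStep zc v) (s + 1)]
    have hscan : (List.scanl fzsStep zc (v :: t)).tail = List.scanl fzsStep (fzsStep zc v) t := by
      simp [List.scanl]
    rw [List.length_cons, hscan, List.range_succ_eq_map, List.flatMap_cons, List.flatMap_map]
    have hhead : (List.scanl fzsStep (fzsStep zc v) t).getD 0 0 = fzsStep zc v := by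
      cases t <;> simp [List.scanl]
    have hshift : ∀ i : Nat,
        (List.scanl fzsStep (fzsStep zc v) t).tail.getD i 0
        = (List.scanl fzsStep (fzsStep zc v) t).getD (i + 1) 0 := by
      intro i; rw [scanl_getD_succ]
    simp only [Nat.succ_eq_add_one, Nat.cast_add, Nat.cast_one, Nat.cast_zero,
      add_zero, hhead]
    rw [show ((List.range t.length).flatMap fun i =>
          if ((List.scanl fzsStep (fzsStep zc v) t).tail.getD i 0 == x) = true
          then [s + 1 + (i : Int) - (x - 1), s + 1 + (i : Int)] else [])
        = ((List.range t.length).flatMap fun i =>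
          if ((List.scanl fzsStep (fzsStep zc v) t).getD (i + 1) 0 == x) = true
          then [s + ((i : Int) + 1) - (x - 1), s + ((i : Int) + 1)] else []) from by
      rw [← fzs_tail_shift]; congr 1; funext i; rw [hshift]]
    by_cases hx : fzsStep zc v = x
    · simp only [hx, beq_self_eq_true, if_pos]
      rw [List.append_assoc]
    · have hb : (fzsStep zc v == x) = false := by simp [hx]
      simp only [hb, Bool.false_eq_true, if_false, List.nil_append]

lemma fzsLastOne_le (l : List Int) (i : Nat) : fzsLastOne l i ≤ (i : Int) := by
  induction i with
  | zero => unfold fzsLastOne; split <;> norm_num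
  | succ n ih =>
    unfold fzsLastOne
    split
    · push_cast; omega
    · refine le_trans ih ?_; push_cast; omega

lemma fzsLastOne_ge (l : List Int) (i : Nat) : -1 ≤ fzsLastOne l i := by
  induction i with
  | zero => unfold fzsLastOne; split <;> norm_num
  | succ n ih =>
    unfold fzsLastOne
    split
    · omega
    · exact ih

lemma scanl_getD_step (l : List Int) : ∀ (b : Int) (i : Nat), i < l.length →
    (List.scanl fzsStep b l).getD (i + 1) 0
    = fzsStep ((List.scanl fzsStep b l).getD i 0) (l.getD i 0) := by
  induction l with
  | nil => intro b i h; simp at h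
  | cons v t ih =>
    intro b i h
    rw [List.scanl_cons]
    cases i with
    | zero =>
      cases t <;> simp [List.scanl_cons, List.scanl_nil]
    | succ n =>
      simp only [List.getD_cons_succ]
      exact ih (fzsStep b v) n (by simpa using h)

-- the scanl table of A's counter equals B's brute-force zero count
lemma scanl_eq_fzsZeros (l : List Int) : ∀ (i : Nat), i < l.length →
    (List.scanl fzsStep 0 l).getD (i + 1) 0 = (fzsZeros l i : Int) := by
  intro i
  induction i with
  | zero =>
    intro h
    have h0 : (List.scanl fzsStep 0 l).getD 0 0 = 0 := by
      cases l <;> simp [List.scanl_nil, List.scanl_cons]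
    rw [scanl_getD_step l 0 0 h, h0]
    unfold fzsZeros fzsLastOne fzsStep
    by_cases h1 : l.getD 0 0 = 1
    · rw [h1]; norm_num
    · have hb : (l.getD 0 0 == 1) = false := beq_eq_false_iff_ne.mpr h1
      simp only [hb, Bool.false_eq_true, if_false]
      norm_num
  | succ n ih =>
    intro h
    have hn : n < l.length := by omega
    rw [scanl_getD_step l 0 (n + 1) h, ih hn]
    unfold fzsZeros fzsStep
    rw [show fzsLastOne l (n + 1)
        = if l.getD (n + 1) 0 == 1 then ((n : Int) + 1) else fzsLastOne l n from rfl]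
    by_cases h1 : l.getD (n + 1) 0 = 1
    · rw [h1]
      norm_num
    · have hb1 : (l.getD (n + 1) 0 == 1) = false := beq_eq_false_iff_ne.mpr h1
      simp only [hb1, Bool.false_eq_true, if_false]
      -- the last-one index is unchanged; the counted range grows by one element (n+1)
      have hle : fzsLastOne l n ≤ (n : Int) := fzsLastOne_le l n
      have hge : -1 ≤ fzsLastOne l n := fzsLastOne_ge l n
      set j := fzsLastOne l n with hj
      have hlen : n + 1 + 1 - (j + 1).toNat = (n + 1 - (j + 1).toNat) + 1 := by omega
      have hend : (j + 1).toNat + (n + 1 - (j + 1).toNat) = n + 1 := by omega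
      rw [hlen, List.range'_1_concat, hend, List.countP_append]
      simp only [List.countP_cons, List.countP_nil, Nat.zero_add]
      by_cases h0 : l.getD (n + 1) 0 = 0
      · rw [h0]; norm_num
      · have hb0 : (l.getD (n + 1) 0 == 0) = false := beq_eq_false_iff_ne.mpr h0
        simp only [hb0, Bool.false_eq_true, if_false, Nat.add_zero]

lemma flatMap_congr_mem {α β : Type} (l : List α) (f g : α → List β)
    (h : ∀ a ∈ l, f a = g a) : l.flatMap f = l.flatMap g := by
  induction l with
  | nil => rfl
  | cons a t ih =>
    simp only [List.flatMap_cons, h a (List.mem_cons_self), ih (fun b hb => h b (List.mem_cons_of_mem a hb))]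

-- ===== VERDICT (by name: the statement is the Claim_ definition above) =====
theorem find_zero_sequence_spec : Claim_equal_find_zero_sequence := by
  intro l x _
  unfold Spec_find_zero_sequence find_zero_sequence find_zero_sequence_alt
  rw [fzs_key]
  simp only [List.nil_append, zero_add]
  apply flatMap_congr_mem
  intro i hi
  rw [← scanl_getD_succ, scanl_eq_fzsZeros l i (List.mem_range.mp hi)]
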